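-- pv_equiv track=rewrite | github.com/hyewonji/Algorithm | programmers/level2/42578.py | solution
-- ===== SOURCE A (Python) =====
-- from itertools import combinations
-- from functools import reduce
--
-- def solution(clothes):
--
--   clothes_obj = {}
--   answer = 0
--
--   for cloth in clothes:
--     cloth_type = cloth[1]
--     if cloth_type in clothes_obj.keys():
--       clothes_obj[cloth_type] += 1
--     else:
--       clothes_obj[cloth_type] = 1
--
--   if len(clothes_obj) == 1:
--     answer = len(clothes)
--   else:
--     for i in range(len(clothes_obj)):
--       nums_comb = list(combinations(clothes_obj.values(),i+1))
--       for nums in nums_comb: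
--         answer += reduce(lambda x, y: x * y, nums)
--
--   return answer
-- ===== SOURCE B (Python) =====
-- def solution(clothes):
--     counts = {}
--     for cloth in clothes:
--         t = cloth[1]
--         counts[t] = counts.get(t, 0) + 1
--     ans = 1
--     for c in counts.values():
--         ans *= c + 1
--     return ans - 1
-- ===== Notes on version B (the rewrite author's own statement) =====
-- stated objective: faster
-- what changed: Replaced the enumeration of all non-empty combinations of the per-type counts (summing the product of each combination) by the closed form: product of (count+1) over all types, minus 1.
import Mathlib
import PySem

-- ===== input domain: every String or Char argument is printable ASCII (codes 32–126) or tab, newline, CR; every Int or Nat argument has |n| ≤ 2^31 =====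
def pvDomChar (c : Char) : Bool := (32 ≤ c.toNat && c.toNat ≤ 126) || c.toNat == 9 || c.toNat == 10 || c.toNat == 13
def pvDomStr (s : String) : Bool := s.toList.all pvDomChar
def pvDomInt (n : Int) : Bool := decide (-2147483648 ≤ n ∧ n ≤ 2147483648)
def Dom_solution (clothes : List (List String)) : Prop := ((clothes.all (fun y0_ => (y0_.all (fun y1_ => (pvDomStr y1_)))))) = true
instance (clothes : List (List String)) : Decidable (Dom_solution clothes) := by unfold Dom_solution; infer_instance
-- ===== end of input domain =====

-- B replaces A's enumeration of all non-empty combinations of type counts by the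
-- closed form  prod (count+1) - 1  (faster: O(n) instead of O(2^k)).


-- ===== PORT A =====
-- reduce(lambda x, y: x * y, nums): nums is always non-empty here ([] branch unreachable)
def pvReduceMul (nums : List Int) : Int :=
  match nums with
  | [] => 0
  | x :: xs => xs.foldl (· * ·) x

-- itertools.combinations(xs, k), in itertools' order
def pvComb (k : Nat) (xs : List Int) : List (List Int) :=
  match k, xs with
  | 0, _ => [[]]
  | _ + 1, [] => []
  | k + 1, x :: rest => (pvComb k rest).map (x :: ·) ++ pvComb (k + 1) rest

def solution (clothes : List (List String)) : Int :=
  -- the counting loop: cloth[1] is exact under Pre_ (cloth has an index 1)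
  let clothes_obj : PySem.Dict String Int :=
    clothes.foldl (fun d cloth =>
      let t := PySem.List.pyGetD cloth 1 ""
      if (d.get? t).isSome then d.insert t (d.getD t 0 + 1) else d.insert t 1)
      PySem.Dict.empty
  if clothes_obj.items.length == 1 then (clothes.length : Int)
  else
    (PySem.List.pyRange 0 (clothes_obj.items.length : Int) 1).foldl
      (fun answer i =>
        (pvComb (i.toNat + 1) clothes_obj.values).foldl
          (fun acc nums => acc + pvReduceMul nums) answer) 0

-- ===== PORT B =====
def solution_alt (clothes : List (List String)) : Int :=
  let counts : PySem.Dict String Int :=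
    clothes.foldl (fun d cloth =>
      let t := PySem.List.pyGetD cloth 1 ""
      d.insert t (d.getD t 0 + 1))
      PySem.Dict.empty
  counts.values.foldl (fun a c => a * (c + 1)) 1 - 1

-- ===== PRECONDITION & SPEC =====
-- Pre_ excludes exactly the inputs where the Python A raises IndexError (a cloth with fewer than 2 entries).
def Pre_solution (clothes : List (List String)) : Prop := ∀ cloth ∈ clothes, 2 ≤ cloth.length
instance (clothes : List (List String)) : Decidable (Pre_solution clothes) := by unfold Pre_solution; infer_instance
def pvWitness_solution : List (List String) := [["yellow_hat", "headgear"], ["blue_sunglasses", "eyewear"], ["green_turban", "headgear"]]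
def Spec_solution (clothes : List (List String)) (out : Int) : Prop := out = solution_alt clothes
instance (clothes : List (List String)) (out : Int) : Decidable (Spec_solution clothes out) := by unfold Spec_solution; infer_instance

-- ===== CLAIM (what is proved, stated in full; the proofs are below) =====
def Claim_equal_solution : Prop := ∀ (clothes : List (List String)), Dom_solution clothes → Pre_solution clothes → Spec_solution clothes (solution clothes)

-- ===== LEMMAS AND PROOFS =====

-- B's counting step; A's step is extensionally equal (pvStepA_eq)
def pvStep (d : PySem.Dict String Int) (cloth : List String) : PySem.Dict String Int :=
  d.insert (PySem.List.pyGetD cloth 1 "") (d.getD (PySem.List.pyGetD cloth 1 "") 0 + 1)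

theorem pvStepA_eq (d : PySem.Dict String Int) (cloth : List String) :
    (let t := PySem.List.pyGetD cloth 1 ""
     if (d.get? t).isSome then d.insert t (d.getD t 0 + 1) else d.insert t 1) = pvStep d cloth := by
  cases h : d.get? (PySem.List.pyGetD cloth 1 "") <;>
    simp [pvStep, PySem.Dict.getD, h]

-- replacing the (unique) entry with key t by (t, v) keeps the keys and replaces that value
theorem pvReplace_spec (t : String) (v : Int) :
    ∀ (l : List (String × Int)), (l.map Prod.fst).Nodup →
      ∀ p0, List.find? (fun p => p.1 == t) l = some p0 →
        ((l.map (fun p => if p.1 == t then (t, v) else p)).map Prod.fst = l.map Prod.fst ∧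
         ((l.map (fun p => if p.1 == t then (t, v) else p)).map Prod.snd).sum
           = (l.map Prod.snd).sum - p0.2 + v) := by
  intro l
  induction l with
  | nil => intro _ p0 h; simp at h
  | cons q rest ih =>
    intro hnd p0 hf
    by_cases hq : (q.1 == t) = true
    · have hqt : q.1 = t := eq_of_beq hq
      rw [List.find?_cons, hq] at hf
      have hf' : q = p0 := by simpa using hf
      subst hf'
      have hnotin : ∀ p ∈ rest, (p.1 == t) = false := by
        intro p hp
        have : q.1 ∉ rest.map Prod.fst := by
          simpa using (List.nodup_cons.mp hnd).1
        simp only [beq_eq_false_iff_ne]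
        intro hpt
        exact this (List.mem_map.mpr ⟨p, hp, by rw [hpt, hqt]⟩)
      have hrest : rest.map (fun p => if p.1 == t then (t, v) else p) = rest := by
        apply List.map_congr_left ?_ |>.trans (List.map_id rest)
        intro p hp; simp [hnotin p hp]
      constructor
      · rw [List.map_cons, if_pos hq, hrest]
        simp [hqt]
      · rw [List.map_cons, if_pos hq, hrest]
        simp only [List.map_cons, List.sum_cons]
        ring
    · rw [List.find?_cons] at hf
      simp only [Bool.not_eq_true] at hq
      rw [hq] at hf
      have hnd' := (List.nodup_cons.mp hnd).2
      obtain ⟨hk, hs⟩ := ih hnd' p0 hf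
      have hq' : ¬((q.1 == t) = true) := by simp [hq]
      constructor
      · rw [List.map_cons, if_neg hq', List.map_cons, hk, List.map_cons]
      · rw [List.map_cons, if_neg hq']
        simp only [List.map_cons, List.sum_cons, hs]
        ring

-- one counting step: keys stay nodup, the sum of values grows by one
theorem pvStep_inv (d : PySem.Dict String Int) (t : String)
    (hnd : (d.items.map Prod.fst).Nodup) :
    (((d.insert t (d.getD t 0 + 1)).items.map Prod.fst).Nodup ∧
     ((d.insert t (d.getD t 0 + 1)).items.map Prod.snd).sum
       = (d.items.map Prod.snd).sum + 1) := by
  by_cases hc : d.contains t = true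
  · obtain ⟨p0, hp0⟩ : ∃ p0, List.find? (fun p => p.1 == t) d.items = some p0 := by
      rw [← Option.isSome_iff_exists, List.find?_isSome]
      simpa [PySem.Dict.contains, List.any_eq_true] using hc
    have hget : d.getD t 0 = p0.2 := by
      simp [PySem.Dict.getD, PySem.Dict.get?, hp0]
    obtain ⟨hk, hs⟩ := pvReplace_spec t (d.getD t 0 + 1) d.items hnd p0 hp0
    constructor
    · simp only [PySem.Dict.insert, hc, if_true]
      rw [hk]; exact hnd
    · simp only [PySem.Dict.insert, hc, if_true]
      rw [hs, hget]; ring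
  · have hnotin : ∀ p ∈ d.items, (p.1 == t) = false := by
      intro p hp
      by_contra h
      rw [Bool.not_eq_false] at h
      exact hc (by
        show d.items.any (fun p => p.1 == t) = true
        rw [List.any_eq_true]
        exact ⟨p, hp, h⟩)
    have hget : d.get? t = none := by
      simp only [PySem.Dict.get?, Option.map_eq_none_iff]
      rw [List.find?_eq_none]
      intro p hp
      simp [hnotin p hp]
    have hgd : d.getD t 0 = 0 := by simp [PySem.Dict.getD, hget]
    constructor
    · simp only [PySem.Dict.insert, hc, Bool.false_eq_true, if_false, List.map_append,
        List.map_cons, List.map_nil]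
      rw [List.nodup_append]
      refine ⟨hnd, List.nodup_singleton _, ?_⟩
      intro a ha b hb
      have hb' : b = t := by simpa using hb
      subst hb'
      obtain ⟨p, hp, hpt⟩ := List.mem_map.mp ha
      have := hnotin p hp
      intro hat
      rw [hpt, hat] at this
      simp at this
    · simp only [PySem.Dict.insert, hc, Bool.false_eq_true, if_false, List.map_append,
        List.map_cons, List.map_nil, List.sum_append, List.sum_cons, List.sum_nil, hgd]
      ring

-- the counting fold keeps keys nodup and its values sum to the number of items counted
theorem pvFold_inv : ∀ (cs : List (List String)) (d : PySem.Dict String Int),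
    (d.items.map Prod.fst).Nodup →
    (((cs.foldl pvStep d).items.map Prod.fst).Nodup ∧
     ((cs.foldl pvStep d).items.map Prod.snd).sum
       = (d.items.map Prod.snd).sum + cs.length) := by
  intro cs
  induction cs with
  | nil => intro d hnd; simpa using hnd
  | cons c rest ih =>
    intro d hnd
    obtain ⟨hnd', hs'⟩ := pvStep_inv d (PySem.List.pyGetD c 1 "") hnd
    obtain ⟨hnd'', hs''⟩ := ih (pvStep d c) hnd'
    refine ⟨hnd'', ?_⟩
    simp only [List.foldl_cons] at hnd'' hs'' ⊢
    rw [hs'', show (pvStep d c).items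
        = (d.insert (PySem.List.pyGetD c 1 "") (d.getD (PySem.List.pyGetD c 1 "") 0 + 1)).items from rfl,
      hs']
    simp only [List.length_cons]
    push_cast
    ring

-- reduce(mul) on a non-empty list is the product
theorem pvFoldlMul (xs : List Int) : ∀ a : Int, xs.foldl (· * ·) a = a * xs.prod := by
  induction xs with
  | nil => simp
  | cons x xs ih => intro a; simp only [List.foldl_cons, List.prod_cons, ih, mul_assoc]

theorem pvReduceMul_prod (l : List Int) (h : l ≠ []) : pvReduceMul l = l.prod := by
  cases l with
  | nil => exact absurd rfl h
  | cons x xs => simp [pvReduceMul, pvFoldlMul, List.prod_cons]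

-- B's product loop
theorem pvFoldlMulSucc (vs : List Int) : ∀ a : Int,
    vs.foldl (fun a c => a * (c + 1)) a = a * (vs.map (· + 1)).prod := by
  induction vs with
  | nil => simp
  | cons v vs ih => intro a; simp only [List.foldl_cons, List.map_cons, List.prod_cons, ih, mul_assoc]

-- combinations facts
theorem pvComb_nil_of_lt : ∀ (xs : List Int) (k : Nat), xs.length < k → pvComb k xs = [] := by
  intro xs
  induction xs with
  | nil =>
    intro k h
    cases k with
    | zero => omega
    | succ k => rfl
  | cons x rest ih =>
    intro k h
    cases k with
    | zero => omega
    | succ k =>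
      simp only [pvComb]
      rw [ih k (by simp at h; omega), ih (k + 1) (by simp at h; omega)]
      simp

theorem pvComb_succ_ne_nil : ∀ (xs : List Int) (k : Nat) (l : List Int),
    l ∈ pvComb (k + 1) xs → l ≠ [] := by
  intro xs
  induction xs with
  | nil => intro k l h; simp [pvComb] at h
  | cons x rest ih =>
    intro k l h
    simp only [pvComb, List.mem_append, List.mem_map] at h
    rcases h with ⟨l', _, rfl⟩ | h
    · simp
    · exact ih k l h

-- the sum of products of all k-combinations
def pvT (vs : List Int) (k : Nat) : Int := ((pvComb k vs).map List.prod).sum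

theorem pvT_zero (vs : List Int) : pvT vs 0 = 1 := by simp [pvT, pvComb]

theorem pvT_succ (x : Int) (xs : List Int) (k : Nat) :
    pvT (x :: xs) (k + 1) = x * pvT xs k + pvT xs (k + 1) := by
  simp only [pvT, pvComb, List.map_append, List.map_map, List.sum_append]
  congr 1
  rw [show (List.prod ∘ (x :: ·)) = (fun l : List Int => x * l.prod) from funext fun l => by
    simp [Function.comp, List.prod_cons]]
  exact PySem.List.sum_map_const_mul_int _ x _

theorem pvT_of_lt (vs : List Int) (k : Nat) (h : vs.length < k) : pvT vs k = 0 := by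
  simp [pvT, pvComb_nil_of_lt vs k h]

-- peeling the first index off a sum over range (n+1)
theorem pvShift (f : Nat → Int) (n : Nat) :
    ((List.range (n + 1)).map f).sum = f 0 + ((List.range n).map (fun k => f (k + 1))).sum := by
  rw [List.range_succ_eq_map, List.map_cons, List.sum_cons, List.map_map]
  rfl

-- ∑_{k=0..n} pvT vs k = ∏ (v+1)
theorem pvMain : ∀ vs : List Int,
    ((List.range (vs.length + 1)).map (pvT vs)).sum = (vs.map (· + 1)).prod := by
  intro vs
  induction vs with
  | nil => simp [List.range_succ, pvT_zero]
  | cons x xs ih =>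
    have e3 : ((List.range (xs.length + 1 + 1)).map (pvT xs)).sum
        = ((List.range (xs.length + 1)).map (pvT xs)).sum + pvT xs (xs.length + 1) := by
      rw [List.range_succ]; simp
    have e2 : ((List.range (xs.length + 1)).map (fun k => pvT xs (k + 1))).sum
        = (xs.map (· + 1)).prod - 1 := by
      have := pvShift (pvT xs) (xs.length + 1)
      rw [e3, ih, pvT_of_lt xs (xs.length + 1) (by omega), pvT_zero] at this
      omega
    show ((List.range (xs.length + 1 + 1)).map (pvT (x :: xs))).sum = _
    rw [pvShift (pvT (x :: xs)) (xs.length + 1), pvT_zero]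
    rw [show (fun k => pvT (x :: xs) (k + 1)) = (fun k => x * pvT xs k + pvT xs (k + 1)) from
      funext fun k => pvT_succ x xs k]
    rw [PySem.List.sum_map_add_int, PySem.List.sum_map_const_mul_int, ih, e2]
    simp only [List.map_cons, List.prod_cons]
    ring

-- A's double loop computes ∏ (v+1) - 1 over the dict's values
theorem pvElse (vs : List Int) :
    (PySem.List.pyRange 0 (vs.length : Int) 1).foldl
      (fun answer i =>
        (pvComb (i.toNat + 1) vs).foldl (fun acc nums => acc + pvReduceMul nums) answer) 0
    = (vs.map (· + 1)).prod - 1 := by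
  have hinner : ∀ (a : Int) (k : Nat),
      (pvComb (k + 1) vs).foldl (fun acc nums => acc + pvReduceMul nums) a = a + pvT vs (k + 1) := by
    intro a k
    rw [PySem.List.foldl_add]
    unfold pvT
    congr 1
    exact congrArg List.sum (List.map_congr_left fun l hl =>
      pvReduceMul_prod l (pvComb_succ_ne_nil vs k l hl))
  rw [PySem.List.pyRange_zero_natCast]
  rw [show (fun (answer : Int) (i : Int) =>
        (pvComb (i.toNat + 1) vs).foldl (fun acc nums => acc + pvReduceMul nums) answer)
      = (fun answer i => answer + pvT vs (i.toNat + 1)) from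
    funext fun a => funext fun i => hinner a i.toNat]
  rw [PySem.List.foldl_add, List.map_map, zero_add]
  rw [show ((fun i : Int => pvT vs (i.toNat + 1)) ∘ fun k : Nat => (k : Int))
      = fun k : Nat => pvT vs (k + 1) from funext fun k => by simp [Function.comp]]
  have := pvShift (pvT vs) vs.length
  rw [pvMain vs, pvT_zero] at this
  omega

-- ===== VERDICT (by name: the statement is the Claim_ definition above) =====
theorem solution_spec : Claim_equal_solution := by
  intro clothes _ _
  unfold Spec_solution
  simp only [solution, solution_alt]
  rw [show (fun (d : PySem.Dict String Int) (cloth : List String) =>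
        let t := PySem.List.pyGetD cloth 1 ""
        if (d.get? t).isSome then d.insert t (d.getD t 0 + 1) else d.insert t 1)
      = pvStep from funext fun d => funext fun c => pvStepA_eq d c]
  rw [show (fun (d : PySem.Dict String Int) (cloth : List String) =>
        let t := PySem.List.pyGetD cloth 1 ""
        d.insert t (d.getD t 0 + 1))
      = pvStep from rfl]
  set D := clothes.foldl pvStep PySem.Dict.empty with hD
  obtain ⟨hnd, hsum⟩ := pvFold_inv clothes PySem.Dict.empty (by simp [PySem.Dict.empty])
  rw [← hD] at hnd hsum
  simp only [PySem.Dict.empty, List.map_nil, List.sum_nil, zero_add] at hsum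
  have hvals : D.values = D.items.map Prod.snd := rfl
  have hlen : D.values.length = D.items.length := by rw [hvals, List.length_map]
  rw [pvFoldlMulSucc D.values 1, one_mul]
  by_cases h1 : (D.items.length == 1) = true
  · rw [if_pos h1]
    have hl1 : D.items.length = 1 := by simpa using h1
    obtain ⟨p, hp⟩ := List.length_eq_one_iff.mp hl1
    rw [hp] at hsum
    simp only [List.map_cons, List.map_nil, List.sum_cons, List.sum_nil, add_zero] at hsum
    rw [hvals, hp]
    simp [← hsum]
  · rw [if_neg h1, ← hlen]
    exact pvElse D.values
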